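-- pv_equiv track=rewrite | github.com/joelbarmettlerUZH/vue-mcp | packages/core/src/vue_docs_core/parsing/markdown.py | _section_api_style
-- ===== SOURCE A (Python) =====
-- def _section_api_style(api_map: list[str], start: int, end: int) -> str:
--     """Aggregate API style for a range of lines."""
--     styles = {api_map[i] for i in range(start, min(end, len(api_map))) if api_map[i] != "both"}
--     if not styles:
--         return "both"
--     if styles == {"options"}:
--         return "options"
--     if styles == {"composition"}:
--         return "composition"
--     return "both"
-- ===== SOURCE B (Python) =====
-- def _section_api_style(api_map: list[str], start: int, end: int) -> str:
--     """Aggregate API style for a range of lines."""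
--     stop = min(end, len(api_map))
--     # Phase 1: skip leading "both" lines to find the first style witness.
--     i = start
--     while i < stop and api_map[i] == "both":
--         i += 1
--     if i >= stop:
--         return "both"
--     style = api_map[i]
--     if style != "options" and style != "composition":
--         return "both"
--     # Phase 2: verify the rest is homogeneous, bailing out early on a clash.
--     for j in range(i + 1, stop):
--         if api_map[j] != "both" and api_map[j] != style:
--             return "both"
--     return style
-- ===== Notes on version B (the rewrite author's own statement) =====
-- stated objective: alternative
-- what changed: Replaces A's build-a-set-then-compare-with-singletons approach by a two-phase witness-and-verify scan: skip leading 'both' lines to find the first concrete style, then verify the remainder matches it, returning 'both' early at the first clash instead of ever materialising a set.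
import Mathlib
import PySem

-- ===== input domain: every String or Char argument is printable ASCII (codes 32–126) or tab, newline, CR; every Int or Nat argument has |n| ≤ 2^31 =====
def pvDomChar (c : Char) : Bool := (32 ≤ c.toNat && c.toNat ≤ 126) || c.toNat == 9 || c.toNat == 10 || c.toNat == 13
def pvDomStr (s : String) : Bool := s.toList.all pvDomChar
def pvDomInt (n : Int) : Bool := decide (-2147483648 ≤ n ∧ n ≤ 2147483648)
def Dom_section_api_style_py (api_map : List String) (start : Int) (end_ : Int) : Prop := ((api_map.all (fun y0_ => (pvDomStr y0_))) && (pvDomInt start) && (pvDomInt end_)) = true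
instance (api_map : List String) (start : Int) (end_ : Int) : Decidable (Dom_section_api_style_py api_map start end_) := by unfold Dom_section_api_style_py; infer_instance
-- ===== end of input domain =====

-- B replaces A's build-a-set-then-compare approach by a two-phase witness-and-verify scan
-- with early exit; objective: alternative algorithm of the same cost.

-- ===== PORT A =====
-- Set comprehension over range(start, min(end, len(api_map))), then set-equality tests.
-- The `.getD ""` default is reached only where Python raises IndexError, outside Pre_.
def section_api_style_py (api_map : List String) (start : Int) (end_ : Int) : String :=
  let styles : PySem.Set String :=
    (PySem.List.pyRange start (min end_ (api_map.length : Int)) 1).foldl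
      (fun s i =>
        let v := (PySem.List.pyGet? api_map i).getD ""
        if v ≠ "both" then PySem.Set.add s v else s)
      PySem.Set.empty
  if styles.isEmpty then "both"
  else if PySem.Set.equal styles ["options"] then "options"
  else if PySem.Set.equal styles ["composition"] then "composition"
  else "both"

-- ===== PORT B =====
-- Phase 1 (the while loop): skip leading "both" lines of the index range; the `.getD ""`
-- default is reached only where Python raises IndexError, outside Pre_.
def sapSkip (api_map : List String) : List Int → List Int
  | [] => []
  | i :: rest =>
      if (PySem.List.pyGet? api_map i).getD "" = "both" then sapSkip api_map rest
      else i :: rest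

-- Phase 2 (the for loop): verify the remaining lines are "both" or the witness style,
-- returning "both" at the first clash.
def sapVerify (api_map : List String) (style : String) : List Int → String
  | [] => style
  | j :: rest =>
      let v := (PySem.List.pyGet? api_map j).getD ""
      if v ≠ "both" ∧ v ≠ style then "both" else sapVerify api_map style rest

def section_api_style_py_alt (api_map : List String) (start : Int) (end_ : Int) : String :=
  let stop := min end_ (api_map.length : Int)
  match sapSkip api_map (PySem.List.pyRange start stop 1) with
  | [] => "both"
  | i :: rest =>
      let style := (PySem.List.pyGet? api_map i).getD ""
      if style ≠ "options" ∧ style ≠ "composition" then "both"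
      else sapVerify api_map style rest

-- ===== PRECONDITION & SPEC =====
-- Pre_ excludes exactly the inputs on which Python A raises IndexError: a nonempty index
-- range whose first index lies below -len(api_map), so api_map[i] is out of range even
-- after Python's negative-index wraparound. (B raises there too.)
def Pre_section_api_style_py (api_map : List String) (start : Int) (end_ : Int) : Prop :=
  min end_ (api_map.length : Int) ≤ start ∨ -(api_map.length : Int) ≤ start
instance (api_map : List String) (start : Int) (end_ : Int) : Decidable (Pre_section_api_style_py api_map start end_) := by unfold Pre_section_api_style_py; infer_instance

def pvWitness_section_api_style_py : List String × Int × Int := (["options", "both", "options"], 0, 3)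

def Spec_section_api_style_py (api_map : List String) (start : Int) (end_ : Int) (out : String) : Prop := out = section_api_style_py_alt api_map start end_
instance (api_map : List String) (start : Int) (end_ : Int) (out : String) : Decidable (Spec_section_api_style_py api_map start end_ out) := by unfold Spec_section_api_style_py; infer_instance

-- ===== CLAIM (what is proved, stated in full; the proofs are below) =====
def Claim_equal_section_api_style_py : Prop := ∀ (api_map : List String) (start : Int) (end_ : Int), Dom_section_api_style_py api_map start end_ → Pre_section_api_style_py api_map start end_ → Spec_section_api_style_py api_map start end_ (section_api_style_py api_map start end_)

-- ===== LEMMAS AND PROOFS =====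

-- Reference aggregate over a list of indices: "options" iff some line is "options" and all
-- are "both"/"options"; symmetrically for "composition"; otherwise "both".
def sapTarget (api_map : List String) (L : List Int) : String :=
  if (∃ i ∈ L, (PySem.List.pyGet? api_map i).getD "" = "options") ∧
     (∀ i ∈ L, (PySem.List.pyGet? api_map i).getD "" = "both" ∨
               (PySem.List.pyGet? api_map i).getD "" = "options") then "options"
  else if (∃ i ∈ L, (PySem.List.pyGet? api_map i).getD "" = "composition") ∧
          (∀ i ∈ L, (PySem.List.pyGet? api_map i).getD "" = "both" ∨
                    (PySem.List.pyGet? api_map i).getD "" = "composition") then "composition"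
  else "both"

-- Membership in A's accumulated set.
lemma sapA_mem (api_map : List String) (L : List Int) (s0 : PySem.Set String) (x : String) :
    x ∈ L.foldl (fun s i =>
        let v := (PySem.List.pyGet? api_map i).getD ""
        if v ≠ "both" then PySem.Set.add s v else s) s0 ↔
      x ∈ s0 ∨ (∃ i ∈ L, (PySem.List.pyGet? api_map i).getD "" = x ∧ x ≠ "both") := by
  induction L generalizing s0 with
  | nil => simp
  | cons a L ih =>
    rw [List.foldl_cons, ih]
    rw [show (let v := (PySem.List.pyGet? api_map a).getD ""
              if v ≠ "both" then PySem.Set.add s0 v else s0)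
        = (if (PySem.List.pyGet? api_map a).getD "" ≠ "both"
           then PySem.Set.add s0 ((PySem.List.pyGet? api_map a).getD "") else s0) from rfl]
    by_cases hb : (PySem.List.pyGet? api_map a).getD "" = "both"
    · rw [if_neg (by simp [hb])]
      constructor
      · rintro (h | ⟨i, hi, hx, hxb⟩)
        · exact Or.inl h
        · exact Or.inr ⟨i, List.mem_cons_of_mem a hi, hx, hxb⟩
      · rintro (h | ⟨i, hi, hx, hxb⟩)
        · exact Or.inl h
        · rcases List.mem_cons.1 hi with rfl | hi'
          · exact absurd (hx ▸ hb) hxb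
          · exact Or.inr ⟨i, hi', hx, hxb⟩
    · rw [if_pos hb]
      rw [PySem.Set.mem_add]
      constructor
      · rintro ((h | h) | ⟨i, hi, hx, hxb⟩)
        · exact Or.inl h
        · exact Or.inr ⟨a, List.mem_cons_self, h.symm, h ▸ hb⟩
        · exact Or.inr ⟨i, List.mem_cons_of_mem a hi, hx, hxb⟩
      · rintro (h | ⟨i, hi, hx, hxb⟩)
        · exact Or.inl (Or.inl h)
        · rcases List.mem_cons.1 hi with rfl | hi'
          · exact Or.inl (Or.inr hx.symm)
          · exact Or.inr ⟨i, hi', hx, hxb⟩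

-- A's if-chain decision for any set with the right members equals the reference aggregate.
lemma sapA_decide (api_map : List String) (L : List Int) (s : PySem.Set String)
    (hmem : ∀ x, x ∈ s ↔ ∃ i ∈ L, (PySem.List.pyGet? api_map i).getD "" = x ∧ x ≠ "both") :
    (if s.isEmpty then "both"
     else if PySem.Set.equal s ["options"] then "options"
     else if PySem.Set.equal s ["composition"] then "composition"
     else "both") = sapTarget api_map L := by
  have hsingle : ∀ (y : String), y ≠ "both" →
      (PySem.Set.equal s [y] = true ↔
        (∃ i ∈ L, (PySem.List.pyGet? api_map i).getD "" = y) ∧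
        (∀ i ∈ L, (PySem.List.pyGet? api_map i).getD "" = "both" ∨
                  (PySem.List.pyGet? api_map i).getD "" = y)) := by
    intro y hy
    rw [PySem.Set.equal_iff]
    constructor
    · intro hiff
      have hin : y ∈ s := (hiff y).2 (by simp)
      rcases (hmem y).1 hin with ⟨i0, hi0, hgi0, -⟩
      refine ⟨⟨i0, hi0, hgi0⟩, ?_⟩
      intro i hi
      by_cases hb : (PySem.List.pyGet? api_map i).getD "" = "both"
      · exact Or.inl hb
      · have hmemi : (PySem.List.pyGet? api_map i).getD "" ∈ s :=
          (hmem _).2 ⟨i, hi, rfl, hb⟩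
        have := (hiff _).1 hmemi
        simp at this
        exact Or.inr this
    · rintro ⟨⟨i0, hi0, hgi0⟩, hall⟩
      intro x
      constructor
      · intro hx
        rcases (hmem x).1 hx with ⟨i, hi, hgx, hxb⟩
        rcases hall i hi with h | h
        · exact absurd (hgx ▸ h) hxb
        · simp [← hgx, h]
      · intro hx
        simp at hx
        exact hx ▸ (hmem y).2 ⟨i0, hi0, hgi0, hy⟩
  unfold sapTarget
  by_cases hO : (∃ i ∈ L, (PySem.List.pyGet? api_map i).getD "" = "options") ∧
                (∀ i ∈ L, (PySem.List.pyGet? api_map i).getD "" = "both" ∨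
                          (PySem.List.pyGet? api_map i).getD "" = "options")
  · have hoin : "options" ∈ s := (hmem _).2 ⟨hO.1.choose, hO.1.choose_spec.1, hO.1.choose_spec.2, by decide⟩
    have hne : ¬ (s.isEmpty = true) := by
      cases s with
      | nil => simp at hoin
      | cons b t => simp
    rw [if_neg hne, if_pos ((hsingle "options" (by decide)).2 hO), if_pos hO]
  · by_cases hC : (∃ i ∈ L, (PySem.List.pyGet? api_map i).getD "" = "composition") ∧
                  (∀ i ∈ L, (PySem.List.pyGet? api_map i).getD "" = "both" ∨
                            (PySem.List.pyGet? api_map i).getD "" = "composition")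
    · have hcin : "composition" ∈ s :=
        (hmem _).2 ⟨hC.1.choose, hC.1.choose_spec.1, hC.1.choose_spec.2, by decide⟩
      have hne : ¬ (s.isEmpty = true) := by
        cases s with
        | nil => simp at hcin
        | cons b t => simp
      rw [if_neg hne, if_neg (fun h => hO ((hsingle "options" (by decide)).1 h)),
          if_pos ((hsingle "composition" (by decide)).2 hC), if_neg hO, if_pos hC]
    · rw [if_neg hO, if_neg hC]
      by_cases hne : s.isEmpty = true
      · rw [if_pos hne]
      · rw [if_neg hne, if_neg (fun h => hO ((hsingle "options" (by decide)).1 h)),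
            if_neg (fun h => hC ((hsingle "composition" (by decide)).1 h))]

-- Phase 2 characterised: sapVerify returns the style iff every remaining line is
-- "both" or that style, else "both".
lemma sapVerify_eq (api_map : List String) (style : String) (L : List Int) :
    sapVerify api_map style L =
      if ∀ j ∈ L, (PySem.List.pyGet? api_map j).getD "" = "both" ∨
                  (PySem.List.pyGet? api_map j).getD "" = style then style else "both" := by
  induction L with
  | nil => simp [sapVerify]
  | cons a L ih =>
    show (if (PySem.List.pyGet? api_map a).getD "" ≠ "both" ∧
             (PySem.List.pyGet? api_map a).getD "" ≠ style
          then "both" else sapVerify api_map style L) = _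
    rw [ih]
    by_cases h : (PySem.List.pyGet? api_map a).getD "" ≠ "both" ∧
                 (PySem.List.pyGet? api_map a).getD "" ≠ style
    · rw [if_pos h, if_neg]
      intro hall
      rcases hall a List.mem_cons_self with hb | hs
      · exact h.1 hb
      · exact h.2 hs
    · rw [if_neg h]
      by_cases hall : ∀ j ∈ L, (PySem.List.pyGet? api_map j).getD "" = "both" ∨
                               (PySem.List.pyGet? api_map j).getD "" = style
      · rw [if_pos hall, if_pos]
        intro j hj
        rcases List.mem_cons.1 hj with rfl | hj'
        · by_cases hb : (PySem.List.pyGet? api_map j).getD "" = "both"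
          · exact Or.inl hb
          · exact Or.inr (by by_contra hs; exact h ⟨hb, hs⟩)
        · exact hall j hj'
      · rw [if_neg hall, if_neg]
        intro hall'
        exact hall fun j hj => hall' j (List.mem_cons_of_mem a hj)

-- B's decision (skip, then classify the witness, then verify) equals the reference aggregate.
lemma sapB_eq_target (api_map : List String) (L : List Int) :
    (match sapSkip api_map L with
     | [] => "both"
     | i :: rest =>
         let style := (PySem.List.pyGet? api_map i).getD ""
         if style ≠ "options" ∧ style ≠ "composition" then "both"
         else sapVerify api_map style rest) = sapTarget api_map L := by
  induction L with
  | nil => simp [sapSkip, sapTarget]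
  | cons a L ih =>
    by_cases hb : (PySem.List.pyGet? api_map a).getD "" = "both"
    · -- the skip phase drops a; the aggregate is unchanged
      have hskip : sapSkip api_map (a :: L) = sapSkip api_map L := by
        simp [sapSkip, hb]
      rw [hskip, ih]
      unfold sapTarget
      simp [hb]
    · have hskip : sapSkip api_map (a :: L) = a :: L := by
        simp [sapSkip, hb]
      rw [hskip]
      show (if (PySem.List.pyGet? api_map a).getD "" ≠ "options" ∧
               (PySem.List.pyGet? api_map a).getD "" ≠ "composition" then "both"
            else sapVerify api_map ((PySem.List.pyGet? api_map a).getD "") L) = _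
      by_cases ho : (PySem.List.pyGet? api_map a).getD "" = "options"
      · rw [if_neg (by simp [ho]), ho, sapVerify_eq]
        unfold sapTarget
        by_cases hall : ∀ j ∈ L, (PySem.List.pyGet? api_map j).getD "" = "both" ∨
                                 (PySem.List.pyGet? api_map j).getD "" = "options"
        · rw [if_pos hall, if_pos]
          refine ⟨⟨a, List.mem_cons_self, ho⟩, ?_⟩
          intro j hj
          rcases List.mem_cons.1 hj with rfl | hj'
          · exact Or.inr ho
          · exact hall j hj'
        · have hnO : ¬ ((∃ i ∈ a :: L, (PySem.List.pyGet? api_map i).getD "" = "options") ∧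
              (∀ i ∈ a :: L, (PySem.List.pyGet? api_map i).getD "" = "both" ∨
                             (PySem.List.pyGet? api_map i).getD "" = "options")) := by
            rintro ⟨-, hallO⟩
            exact hall fun j hj => hallO j (List.mem_cons_of_mem a hj)
          have hnC : ¬ ((∃ i ∈ a :: L, (PySem.List.pyGet? api_map i).getD "" = "composition") ∧
              (∀ i ∈ a :: L, (PySem.List.pyGet? api_map i).getD "" = "both" ∨
                             (PySem.List.pyGet? api_map i).getD "" = "composition")) := by
            rintro ⟨-, hallC⟩
            rcases hallC a List.mem_cons_self with h | h
            · exact hb h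
            · rw [ho] at h; exact absurd h (by decide)
          rw [if_neg hall, if_neg hnO, if_neg hnC]
      · by_cases hc : (PySem.List.pyGet? api_map a).getD "" = "composition"
        · rw [if_neg (by simp [hc]), hc, sapVerify_eq]
          unfold sapTarget
          have hnO : ¬ ((∃ i ∈ a :: L, (PySem.List.pyGet? api_map i).getD "" = "options") ∧
              (∀ i ∈ a :: L, (PySem.List.pyGet? api_map i).getD "" = "both" ∨
                             (PySem.List.pyGet? api_map i).getD "" = "options")) := by
            rintro ⟨-, hallO⟩
            rcases hallO a List.mem_cons_self with h | h
            exacts [hb h, ho h]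
          rw [if_neg hnO]
          by_cases hall : ∀ j ∈ L, (PySem.List.pyGet? api_map j).getD "" = "both" ∨
                                   (PySem.List.pyGet? api_map j).getD "" = "composition"
          · rw [if_pos hall, if_pos]
            refine ⟨⟨a, List.mem_cons_self, hc⟩, ?_⟩
            intro j hj
            rcases List.mem_cons.1 hj with rfl | hj'
            · exact Or.inr hc
            · exact hall j hj'
          · have hnC : ¬ ((∃ i ∈ a :: L, (PySem.List.pyGet? api_map i).getD "" = "composition") ∧
                (∀ i ∈ a :: L, (PySem.List.pyGet? api_map i).getD "" = "both" ∨
                               (PySem.List.pyGet? api_map i).getD "" = "composition")) := by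
              rintro ⟨-, hallC⟩
              exact hall fun j hj => hallC j (List.mem_cons_of_mem a hj)
            rw [if_neg hall, if_neg hnC]
        · -- an unrecognised style: both sides give "both"
          rw [if_pos ⟨ho, hc⟩]
          unfold sapTarget
          have hnO : ¬ ((∃ i ∈ a :: L, (PySem.List.pyGet? api_map i).getD "" = "options") ∧
              (∀ i ∈ a :: L, (PySem.List.pyGet? api_map i).getD "" = "both" ∨
                             (PySem.List.pyGet? api_map i).getD "" = "options")) := by
            rintro ⟨-, hallO⟩
            rcases hallO a List.mem_cons_self with h | h
            exacts [hb h, ho h]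
          have hnC : ¬ ((∃ i ∈ a :: L, (PySem.List.pyGet? api_map i).getD "" = "composition") ∧
              (∀ i ∈ a :: L, (PySem.List.pyGet? api_map i).getD "" = "both" ∨
                             (PySem.List.pyGet? api_map i).getD "" = "composition")) := by
            rintro ⟨-, hallC⟩
            rcases hallC a List.mem_cons_self with h | h
            exacts [hb h, hc h]
          rw [if_neg hnO, if_neg hnC]

-- ===== VERDICT (by name: the statement is the Claim_ definition above) =====
theorem section_api_style_py_spec : Claim_equal_section_api_style_py := by
  intro api_map start end_ _ _
  unfold Spec_section_api_style_py section_api_style_py section_api_style_py_alt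
  have hA := sapA_decide api_map
    (PySem.List.pyRange start (min end_ (api_map.length : Int)) 1) _
    (fun x => (sapA_mem api_map _ PySem.Set.empty x).trans
      (or_iff_right (by simp [PySem.Set.empty])))
  have hB := sapB_eq_target api_map (PySem.List.pyRange start (min end_ (api_map.length : Int)) 1)
  exact hA.trans hB.symm
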